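-- pv_equiv track=rewrite | github.com/Nurik1002/Scrapy | app/src/platforms/yandex/platform.py | _detect_eco_product
-- ===== SOURCE A (Python) =====
-- from typing import Any, AsyncGenerator, Dict, List, Optional
--
-- def _detect_eco_product(attributes: Dict[str, Any]) -> bool:
--     """Detect if product is eco-friendly based on attributes."""
--     eco_indicators = ["eco", "organic", "bio", "green", "sustainable"]
--
--     for value in attributes.values():
--         if isinstance(value, str) and any(
--             indicator in value.lower() for indicator in eco_indicators
--         ):
--             return True
--
--     return False
-- ===== SOURCE B (Python) =====
-- def _detect_eco_product(attributes):
--     """Detect if product is eco-friendly based on attributes."""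
--     eco_indicators = ["eco", "organic", "bio", "green", "sustainable"]
--     blob = " ".join(v.lower() for v in attributes.values() if isinstance(v, str))
--     return any(indicator in blob for indicator in eco_indicators)
-- ===== Notes on version B (the rewrite author's own statement) =====
-- stated objective: faster
-- what changed: B lowercases and joins all values into one space-separated blob and runs a single C-level substring scan per indicator, instead of A's per-value Python loop with a nested any-generator over indicators; the space separator cannot occur in any indicator, so no cross-boundary match is possible.
import Mathlib
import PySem

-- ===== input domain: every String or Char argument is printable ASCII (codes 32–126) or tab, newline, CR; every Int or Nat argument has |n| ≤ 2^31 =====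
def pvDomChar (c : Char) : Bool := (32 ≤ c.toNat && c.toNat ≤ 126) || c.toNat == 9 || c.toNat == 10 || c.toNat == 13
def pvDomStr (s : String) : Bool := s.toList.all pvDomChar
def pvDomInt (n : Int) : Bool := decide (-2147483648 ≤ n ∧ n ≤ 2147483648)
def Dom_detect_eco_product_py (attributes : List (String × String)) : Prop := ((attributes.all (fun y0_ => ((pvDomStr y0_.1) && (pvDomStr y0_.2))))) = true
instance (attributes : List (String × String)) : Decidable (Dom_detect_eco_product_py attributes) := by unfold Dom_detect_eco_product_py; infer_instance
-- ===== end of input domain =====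

-- B joins all lowercased values into one space-separated blob and does a single membership
-- scan per indicator, instead of A's per-value loop with a nested any and early return (alternative).

-- ===== PORT A =====
def ecoIndicatorsA : List String := ["eco", "organic", "bio", "green", "sustainable"]

-- the for-loop with early `return True`; `isinstance(value, str)` is always true at this type
def detect_eco_product_py (attributes : List (String × String)) : Bool :=
  match attributes with
  | [] => false
  | (_, v) :: rest =>
      if ecoIndicatorsA.any (fun ind => PySem.Str.isIn ind (PySem.Str.lower v)) then true
      else detect_eco_product_py rest

-- ===== PORT B =====
def ecoIndicatorsB : List String := ["eco", "organic", "bio", "green", "sustainable"]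

def detect_eco_product_py_alt (attributes : List (String × String)) : Bool :=
  let blob := PySem.Str.join " " (attributes.map (fun p => PySem.Str.lower p.2))
  ecoIndicatorsB.any (fun ind => PySem.Str.isIn ind blob)

-- ===== PRECONDITION & SPEC =====
def Spec_detect_eco_product_py (attributes : List (String × String)) (out : Bool) : Prop := out = detect_eco_product_py_alt attributes
instance (attributes : List (String × String)) (out : Bool) : Decidable (Spec_detect_eco_product_py attributes out) := by unfold Spec_detect_eco_product_py; infer_instance

-- ===== CLAIM (what is proved, stated in full; the proofs are below) =====
def Claim_equal_detect_eco_product_py : Prop := ∀ (attributes : List (String × String)), Dom_detect_eco_product_py attributes → Spec_detect_eco_product_py attributes (detect_eco_product_py attributes)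

-- ===== LEMMAS AND PROOFS =====

-- a prefix of l1 ++ ' ' :: l2 that avoids ' ' is a prefix of l1
theorem pv_prefix_sep {cs l1 l2 : List Char} (hsep : ' ' ∉ cs)
    (h : cs <+: l1 ++ ' ' :: l2) : cs <+: l1 := by
  induction cs generalizing l1 with
  | nil => exact List.nil_prefix
  | cons c cs ih =>
    cases l1 with
    | nil =>
      rcases List.cons_prefix_cons.mp h with ⟨hc, _⟩
      exact absurd (hc ▸ List.mem_cons_self) hsep
    | cons b l1' =>
      rcases List.cons_prefix_cons.mp h with ⟨hc, htl⟩
      exact hc ▸ List.cons_prefix_cons.mpr ⟨rfl, ih (fun m => hsep (List.mem_cons_of_mem _ m)) htl⟩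

-- an infix of l1 ++ ' ' :: l2 avoiding ' ' lies in l1 or in l2
theorem pv_infix_sep {cs l1 l2 : List Char} (hsep : ' ' ∉ cs)
    (h : cs <:+: l1 ++ ' ' :: l2) : cs <:+: l1 ∨ cs <:+: l2 := by
  induction l1 with
  | nil =>
    rcases List.infix_cons_iff.mp h with hp | hi
    · cases cs with
      | nil => exact Or.inl (by simp)
      | cons c cs' =>
        rcases List.cons_prefix_cons.mp hp with ⟨hc, _⟩
        exact absurd (hc ▸ List.mem_cons_self) hsep
    · exact Or.inr hi
  | cons b l1' ih =>
    rcases List.infix_cons_iff.mp h with hp | hi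
    · exact Or.inl (pv_prefix_sep hsep hp).isInfix
    · rcases ih hi with h1 | h2
      · exact Or.inl (h1.trans (List.suffix_cons b l1').isInfix)
      · exact Or.inr h2

-- membership of a nonempty, space-free needle in a space-joined blob = any over the pieces
theorem pv_isIn_join (cs : List Char) (hne : cs ≠ []) (hsep : ' ' ∉ cs) (ls : List (List Char)) :
    PySem.Chars.isIn cs (PySem.Chars.join [' '] ls) = ls.any (fun l => PySem.Chars.isIn cs l) := by
  induction ls with
  | nil =>
    simp only [PySem.Chars.join_nil, List.any_nil]
    rw [PySem.Chars.isIn_eq_false_iff]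
    intro hinf
    exact hne (List.eq_nil_of_infix_nil hinf)
  | cons x xs ih =>
    cases xs with
    | nil => simp [PySem.Chars.join_singleton]
    | cons y ys =>
      rw [PySem.Chars.join_cons_cons, List.any_cons, ← ih, Bool.eq_iff_iff, Bool.or_eq_true,
          PySem.Chars.isIn_iff_infix, PySem.Chars.isIn_iff_infix, PySem.Chars.isIn_iff_infix]
      have happ : x ++ [' '] ++ PySem.Chars.join [' '] (y :: ys)
          = x ++ ' ' :: PySem.Chars.join [' '] (y :: ys) := by simp
      rw [happ]
      constructor
      · exact fun hinf => pv_infix_sep hsep hinf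
      · rintro (h1 | h2)
        · exact h1.trans ⟨[], ' ' :: PySem.Chars.join [' '] (y :: ys), by simp⟩
        · exact h2.trans ⟨x ++ [' '], [], by simp⟩

-- A's early-return loop is List.any
theorem pv_A_eq_any (attributes : List (String × String)) :
    detect_eco_product_py attributes
      = attributes.any (fun p => ecoIndicatorsA.any (fun ind => PySem.Str.isIn ind (PySem.Str.lower p.2))) := by
  induction attributes with
  | nil => rfl
  | cons p rest ih =>
    cases p with
    | mk k v =>
      rw [detect_eco_product_py, List.any_cons, ih]
      split <;> simp_all

-- swap the two any's
theorem pv_any_swap {α β : Type} (L : List α) (M : List β) (f : α → β → Bool) :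
    L.any (fun a => M.any (fun b => f a b)) = M.any (fun b => L.any (fun a => f a b)) := by
  rw [Bool.eq_iff_iff]
  simp only [List.any_eq_true]
  tauto

-- lowered-blob membership = any over the values, for a nonempty space-free needle
theorem pv_blob (ind : String) (hne : ind.toList ≠ []) (hsep : ' ' ∉ ind.toList)
    (attributes : List (String × String)) :
    PySem.Str.isIn ind (PySem.Str.join " " (attributes.map (fun p => PySem.Str.lower p.2)))
      = attributes.any (fun p => PySem.Str.isIn ind (PySem.Str.lower p.2)) := by
  rw [PySem.Str.isIn_eq, PySem.Str.toList_join, List.map_map,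
      show (" " : String).toList = [' '] from rfl, pv_isIn_join _ hne hsep]
  simp [Function.comp_def]

-- ===== VERDICT (by name: the statement is the Claim_ definition above) =====
theorem detect_eco_product_py_spec : Claim_equal_detect_eco_product_py := by
  intro attributes _
  unfold Spec_detect_eco_product_py detect_eco_product_py_alt
  rw [pv_A_eq_any, pv_any_swap]
  simp only [ecoIndicatorsA, ecoIndicatorsB, List.any_cons, List.any_nil]
  rw [pv_blob "eco" (by decide) (by decide), pv_blob "organic" (by decide) (by decide),
      pv_blob "bio" (by decide) (by decide), pv_blob "green" (by decide) (by decide),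
      pv_blob "sustainable" (by decide) (by decide)]
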